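-- pv_equiv track=rewrite | github.com/brndngln/PLACE-HOLDER---OQEACS | services/ai-coder-alpha/gitea-webhook-handler/main.py | extract_complexity_from_labels
-- ===== SOURCE A (Python) =====
-- from typing import Any, Optional
--
-- def extract_complexity_from_labels(labels: list[dict[str, Any]]) -> str:
--     """Extract complexity hint from labels."""
--     label_names = {lb.get("name", "").lower() for lb in labels}
--     if "critical" in label_names:
--         return "critical"
--     if "high" in label_names or "complex" in label_names:
--         return "high"
--     if "low" in label_names or "simple" in label_names or "trivial" in label_names:
--         return "low"
--     return "medium"
-- ===== SOURCE B (Python) =====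
-- _PRIORITY = {"critical": 0, "high": 1, "complex": 1, "low": 2, "simple": 2, "trivial": 2}
--
-- def extract_complexity_from_labels(labels):
--     """Extract complexity hint from labels."""
--     best = 3
--     for lb in labels:
--         best = min(best, _PRIORITY.get(lb.get("name", "").lower(), 3))
--     if best == 0:
--         return "critical"
--     if best == 1:
--         return "high"
--     if best == 2:
--         return "low"
--     return "medium"
-- ===== Notes on version B (the rewrite author's own statement) =====
-- stated objective: alternative
-- what changed: Replaced the set comprehension plus ordered membership-test chain by a single fold that tracks the minimum priority rank from a lookup table and translates the best rank to a string at the end.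
import Mathlib
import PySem

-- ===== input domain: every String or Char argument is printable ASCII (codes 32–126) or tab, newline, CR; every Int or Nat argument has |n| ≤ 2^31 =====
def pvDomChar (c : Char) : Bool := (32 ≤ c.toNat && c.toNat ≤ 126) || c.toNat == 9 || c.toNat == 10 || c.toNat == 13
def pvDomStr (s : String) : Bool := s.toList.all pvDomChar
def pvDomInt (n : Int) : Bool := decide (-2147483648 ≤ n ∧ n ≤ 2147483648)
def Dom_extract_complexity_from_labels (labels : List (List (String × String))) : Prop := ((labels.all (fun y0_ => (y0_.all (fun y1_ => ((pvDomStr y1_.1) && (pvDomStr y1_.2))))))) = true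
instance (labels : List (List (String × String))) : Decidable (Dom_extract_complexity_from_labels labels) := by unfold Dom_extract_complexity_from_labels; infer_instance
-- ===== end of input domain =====

-- B replaces A's set + ordered membership-test chain by one min-reduction over a priority table (alternative decomposition, same cost).

-- ===== PORT A =====
def extract_complexity_from_labels (labels : List (List (String × String))) : String :=
  let label_names : PySem.Set String :=
    PySem.Set.ofList (labels.map (fun lb => PySem.Str.lower (PySem.Dict.getD (PySem.Dict.ofList lb) "name" "")))
  if PySem.Set.contains label_names "critical" then "critical"
  else if PySem.Set.contains label_names "high" || PySem.Set.contains label_names "complex" then "high"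
  else if PySem.Set.contains label_names "low" || PySem.Set.contains label_names "simple" || PySem.Set.contains label_names "trivial" then "low"
  else "medium"

-- ===== PORT B =====
def pvPriority : PySem.Dict String Nat :=
  PySem.Dict.ofList [("critical", 0), ("high", 1), ("complex", 1), ("low", 2), ("simple", 2), ("trivial", 2)]

def extract_complexity_from_labels_alt (labels : List (List (String × String))) : String :=
  let best := labels.foldl
    (fun best lb => min best (PySem.Dict.getD pvPriority (PySem.Str.lower (PySem.Dict.getD (PySem.Dict.ofList lb) "name" "")) 3)) 3
  if best = 0 then "critical"
  else if best = 1 then "high"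
  else if best = 2 then "low"
  else "medium"

-- ===== PRECONDITION & SPEC =====
def Spec_extract_complexity_from_labels (labels : List (List (String × String))) (out : String) : Prop := out = extract_complexity_from_labels_alt labels
instance (labels : List (List (String × String))) (out : String) : Decidable (Spec_extract_complexity_from_labels labels out) := by unfold Spec_extract_complexity_from_labels; infer_instance

-- ===== CLAIM (what is proved, stated in full; the proofs are below) =====
def Claim_equal_extract_complexity_from_labels : Prop := ∀ (labels : List (List (String × String))), Dom_extract_complexity_from_labels labels → Spec_extract_complexity_from_labels labels (extract_complexity_from_labels labels)

-- ===== LEMMAS AND PROOFS =====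

-- the rank a name receives from pvPriority
def pvRank (n : String) : Nat := PySem.Dict.getD pvPriority n 3

lemma pvRank_eq (n : String) :
    pvRank n = if n = "critical" then 0
      else if n = "high" ∨ n = "complex" then 1
      else if n = "low" ∨ n = "simple" ∨ n = "trivial" then 2
      else 3 := by
  by_cases h1 : n = "critical"
  · subst h1; decide
  by_cases h2 : n = "high"
  · subst h2; decide
  by_cases h3 : n = "complex"
  · subst h3; decide
  by_cases h4 : n = "low"
  · subst h4; decide
  by_cases h5 : n = "simple"
  · subst h5; decide
  by_cases h6 : n = "trivial"
  · subst h6; decide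
  have hitems : pvPriority.items
      = [("critical", (0 : Nat)), ("high", 1), ("complex", 1), ("low", 2), ("simple", 2), ("trivial", 2)] := by decide
  have b1 : ("critical" == n) = false := beq_eq_false_iff_ne.mpr (Ne.symm h1)
  have b2 : ("high" == n) = false := beq_eq_false_iff_ne.mpr (Ne.symm h2)
  have b3 : ("complex" == n) = false := beq_eq_false_iff_ne.mpr (Ne.symm h3)
  have b4 : ("low" == n) = false := beq_eq_false_iff_ne.mpr (Ne.symm h4)
  have b5 : ("simple" == n) = false := beq_eq_false_iff_ne.mpr (Ne.symm h5)
  have b6 : ("trivial" == n) = false := beq_eq_false_iff_ne.mpr (Ne.symm h6)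
  simp only [pvRank, PySem.Dict.getD, PySem.Dict.get?, hitems, List.find?]
  simp [b1, b2, b3, b4, b5, b6, h1, h2, h3, h4, h5, h6]

lemma pvFold_min (ns : List String) : ∀ a : Nat, a ≤ 3 →
    ns.foldl (fun b n => min b (pvRank n)) a = min a (ns.foldl (fun b n => min b (pvRank n)) 3) := by
  induction ns with
  | nil => intro a ha; simp; omega
  | cons n t ih =>
      intro a ha
      simp only [List.foldl_cons]
      rw [ih (min a (pvRank n)) (by omega), ih (min 3 (pvRank n)) (by omega)]
      omega

lemma pvFold_eq (ns : List String) :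
    ns.foldl (fun b n => min b (pvRank n)) 3
    = (if "critical" ∈ ns then 0
       else if "high" ∈ ns ∨ "complex" ∈ ns then 1
       else if "low" ∈ ns ∨ "simple" ∈ ns ∨ "trivial" ∈ ns then 2
       else 3) := by
  induction ns with
  | nil => simp
  | cons n t ih =>
      simp only [List.foldl_cons, List.mem_cons]
      rw [pvFold_min t (min 3 (pvRank n)) (by omega), ih, pvRank_eq n]
      split_ifs <;> simp_all [@eq_comm String]

lemma contains_ofList_eq (xs : List String) (x : String) :
    PySem.Set.contains (PySem.Set.ofList xs) x = decide (x ∈ xs) := by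
  simp [pysem]

-- ===== VERDICT (by name: the statement is the Claim_ definition above) =====
theorem extract_complexity_from_labels_spec : Claim_equal_extract_complexity_from_labels := by
  intro labels _
  unfold Spec_extract_complexity_from_labels extract_complexity_from_labels extract_complexity_from_labels_alt
  have hmap : labels.foldl
      (fun best lb => min best (PySem.Dict.getD pvPriority (PySem.Str.lower (PySem.Dict.getD (PySem.Dict.ofList lb) "name" "")) 3)) 3
      = (labels.map (fun lb => PySem.Str.lower (PySem.Dict.getD (PySem.Dict.ofList lb) "name" ""))).foldl
          (fun b n => min b (pvRank n)) 3 := by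
    rw [List.foldl_map]; rfl
  simp only [hmap, pvFold_eq, contains_ofList_eq]
  set ns := labels.map (fun lb => PySem.Str.lower (PySem.Dict.getD (PySem.Dict.ofList lb) "name" ""))
  split_ifs <;> simp_all
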